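-- pv_equiv track=rewrite | github.com/7meis/vscode-saltstack | scripts/export_state_hover_docs.py | _normalize_state_docs
-- ===== SOURCE A (Python) =====
-- def _normalize_docstring(docstring):
--     if not docstring:
--         return ''
--
--     lines = str(docstring).replace('\r\n', '\n').strip().split('\n')
--     normalized = []
--     blank_line = False
--     for line in lines:
--         stripped = line.rstrip()
--         if not stripped:
--             if normalized and not blank_line:
--                 normalized.append('')
--             blank_line = True
--             continue
--         normalized.append(stripped)
--         blank_line = False
--     return '\n'.join(normalized).strip()
--
-- def _normalize_state_docs(raw_state_docs):
--     if not isinstance(raw_state_docs, dict):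
--         raise TypeError('Expected state docs mapping, got {}'.format(type(raw_state_docs).__name__))
--
--     normalized = {}
--     for function_name, docstring in raw_state_docs.items():
--         if not isinstance(function_name, str) or '.' not in function_name:
--             continue
--         normalized_doc = _normalize_docstring(docstring)
--         if normalized_doc:
--             normalized[function_name] = normalized_doc
--     return normalized
-- ===== SOURCE B (Python) =====
-- def _normalize_docstring(docstring):
--     if not docstring:
--         return ''
--     lines = [line.rstrip()
--              for line in str(docstring).replace('\r\n', '\n').strip().split('\n')]
--     kept = lines[:1] + [line for prev, line in zip(lines, lines[1:]) if line or prev]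
--     return '\n'.join(kept).strip()
--
-- def _normalize_state_docs(raw_state_docs):
--     if not isinstance(raw_state_docs, dict):
--         raise TypeError('Expected state docs mapping, got {}'.format(type(raw_state_docs).__name__))
--     return {name: doc
--             for name, doc in ((n, _normalize_docstring(d)) for n, d in raw_state_docs.items())
--             if isinstance(name, str) and '.' in name and doc}
-- ===== Notes on version B (the rewrite author's own statement) =====
-- stated objective: idiomatic
-- what changed: The docstring normalizer's stateful blank_line-flag accumulator loop is replaced by rstripping all lines up front and keeping a line iff it or its predecessor is non-blank (zip-with-predecessor filter), and the dict loop becomes a comprehension.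
import Mathlib
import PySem

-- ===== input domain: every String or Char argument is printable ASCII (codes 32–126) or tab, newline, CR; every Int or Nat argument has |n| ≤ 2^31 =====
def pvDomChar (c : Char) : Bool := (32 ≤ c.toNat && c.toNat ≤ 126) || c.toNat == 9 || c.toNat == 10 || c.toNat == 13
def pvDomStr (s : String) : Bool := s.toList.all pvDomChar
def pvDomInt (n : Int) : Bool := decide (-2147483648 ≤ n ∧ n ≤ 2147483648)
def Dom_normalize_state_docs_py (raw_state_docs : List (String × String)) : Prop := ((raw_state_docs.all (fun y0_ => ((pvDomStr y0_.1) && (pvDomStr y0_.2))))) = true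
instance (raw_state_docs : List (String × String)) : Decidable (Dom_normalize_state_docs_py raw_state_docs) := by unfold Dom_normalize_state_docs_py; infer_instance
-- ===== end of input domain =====

-- B replaces A's stateful blank_line-flag loop by: rstrip every line up front, then keep a line
-- iff it or its predecessor is non-blank (a zip-with-predecessor filter) — objective: idiomatic.

-- ===== PORT A =====
-- the loop body of _normalize_docstring (one iteration over (normalized, blank_line))
def pvStepA (st : List String × Bool) (line : String) : List String × Bool :=
  let stripped := PySem.Str.rstrip line
  if stripped = "" then (if st.1 ≠ [] ∧ ¬ st.2 then st.1 ++ [""] else st.1, true)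
  else (st.1 ++ [stripped], false)

-- _normalize_docstring of Source A; 'if not docstring' on a str is the emptiness test, str(...) is the identity
def pvNormDoc (docstring : String) : String :=
  if docstring = "" then ""
  else
    PySem.Str.strip (PySem.Str.join "\n"
      (((PySem.Str.split? (PySem.Str.strip (PySem.Str.replace docstring "\r\n" "\n")) "\n").getD
        []).foldl pvStepA ([], false)).1)

-- _normalize_state_docs of Source A; the isinstance checks are identities under the type convention
def normalize_state_docs_py (raw_state_docs : List (String × String)) : List (String × String) :=
  (raw_state_docs.foldl (fun (d : PySem.Dict String String) p =>
      if PySem.Str.isIn "." p.1 = false then d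
      else if pvNormDoc p.2 ≠ "" then d.insert p.1 (pvNormDoc p.2) else d)
    PySem.Dict.empty).items

-- ===== PORT B =====
-- Source B's kept = lines[:1] + [line for prev, line in zip(lines, lines[1:]) if line or prev]
def pvKept (lines : List String) : List String :=
  lines.take 1 ++ ((lines.zip lines.tail).filter (fun p => p.2 != "" || p.1 != "")).map Prod.snd

def pvNormDocAlt (docstring : String) : String :=
  if docstring = "" then ""
  else
    PySem.Str.strip (PySem.Str.join "\n"
      (pvKept (((PySem.Str.split? (PySem.Str.strip (PySem.Str.replace docstring "\r\n" "\n")) "\n").getD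
        []).map PySem.Str.rstrip)))

-- the dict comprehension of Source B: its keys are pairwise distinct under Pre_, so the built dict
-- is exactly this filtered/mapped association list.
def normalize_state_docs_py_alt (raw_state_docs : List (String × String)) : List (String × String) :=
  raw_state_docs.filterMap (fun p =>
    if PySem.Str.isIn "." p.1 && pvNormDocAlt p.2 != "" then some (p.1, pvNormDocAlt p.2) else none)

-- ===== PRECONDITION & SPEC =====
-- Pre_ excludes association lists with duplicate keys: A's argument is a Python dict, which an
-- assoc list with duplicate keys cannot faithfully represent (calling A on a list raises TypeError).
def Pre_normalize_state_docs_py (raw_state_docs : List (String × String)) : Prop :=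
  (raw_state_docs.map Prod.fst).Nodup
instance (raw_state_docs : List (String × String)) : Decidable (Pre_normalize_state_docs_py raw_state_docs) := by unfold Pre_normalize_state_docs_py; infer_instance

def pvWitness_normalize_state_docs_py : (List (String × String)) :=
  [("pkg.installed", "Ensure a package.\n\n\n  Body.  "), ("helper", "ignored")]

def Spec_normalize_state_docs_py (raw_state_docs : List (String × String)) (out : List (String × String)) : Prop := out = normalize_state_docs_py_alt raw_state_docs
instance (raw_state_docs : List (String × String)) (out : List (String × String)) : Decidable (Spec_normalize_state_docs_py raw_state_docs out) := by unfold Spec_normalize_state_docs_py; infer_instance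

-- ===== CLAIM (what is proved, stated in full; the proofs are below) =====
def Claim_equal_normalize_state_docs_py : Prop := ∀ (raw_state_docs : List (String × String)), Dom_normalize_state_docs_py raw_state_docs → Pre_normalize_state_docs_py raw_state_docs → Spec_normalize_state_docs_py raw_state_docs (normalize_state_docs_py raw_state_docs)

-- ===== LEMMAS AND PROOFS =====

-- canonical collapse loop: pvK b rs keeps non-blank lines and one blank per internal run
-- (b = "the previous line was blank, or we are before the first kept line")
def pvK : Bool → List String → List String
  | _, [] => []
  | b, s :: t => if s = "" then (if b then pvK true t else "" :: pvK true t) else s :: pvK false t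

-- pvStepA with the rstrip factored out
def pvStep (st : List String × Bool) (s : String) : List String × Bool :=
  if s = "" then (if st.1 ≠ [] ∧ ¬ st.2 then st.1 ++ [""] else st.1, true)
  else (st.1 ++ [s], false)

theorem pvStepA_eq : pvStepA = fun st line => pvStep st (PySem.Str.rstrip line) := rfl

theorem pvStep_nonblank (st : List String × Bool) (s : String) (h : ¬ s = "") :
    pvStep st s = (st.1 ++ [s], false) := by simp [pvStep, h]

theorem pvStep_blank_true (acc : List String) : pvStep (acc, true) "" = (acc, true) := by
  simp [pvStep]

theorem pvStep_blank_nil (b : Bool) : pvStep ([], b) "" = ([], true) := by simp [pvStep]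

theorem pvStep_blank_app (acc : List String) (h : acc ≠ []) :
    pvStep (acc, false) "" = (acc ++ [""], true) := by simp [pvStep, h]

theorem pvFold_ne_nil (rs : List String) (acc : List String) (b : Bool) (h : acc ≠ []) :
    (rs.foldl pvStep (acc, b)).1 = acc ++ pvK b rs := by
  induction rs generalizing acc b with
  | nil => simp [pvK]
  | cons s t ih =>
    rw [List.foldl_cons]
    by_cases hs : s = ""
    · subst hs
      cases b with
      | false =>
        rw [pvStep_blank_app acc h, ih _ _ (by simp)]
        simp [pvK]
      | true =>
        rw [pvStep_blank_true acc, ih _ _ h]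
        simp [pvK]
    · rw [pvStep_nonblank _ _ hs, ih _ _ (by simp)]
      simp [pvK, hs]

theorem pvFold_nil (rs : List String) (b : Bool) :
    (rs.foldl pvStep ([], b)).1 = pvK true rs := by
  induction rs generalizing b with
  | nil => simp [pvK]
  | cons s t ih =>
    rw [List.foldl_cons]
    by_cases hs : s = ""
    · subst hs
      rw [pvStep_blank_nil b, ih]
      simp [pvK]
    · rw [pvStep_nonblank _ _ hs, pvFold_ne_nil t (([], b).1 ++ [s]) false (by simp)]
      simp [pvK, hs]

theorem pvZip_filter (t : List String) (prev : String) :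
    ((((prev :: t).zip t).filter (fun p => p.2 != "" || p.1 != "")).map Prod.snd)
      = pvK (decide (prev = "")) t := by
  induction t generalizing prev with
  | nil => simp [pvK]
  | cons x t' ih =>
    by_cases hx : x = ""
    · subst hx
      by_cases hp : prev = ""
      · subst hp
        simp only [List.zip_cons_cons, List.filter_cons]
        rw [if_neg (by simp)]
        rw [ih ""]
        simp [pvK]
      · simp only [List.zip_cons_cons, List.filter_cons]
        rw [if_pos (by simp [hp])]
        simp only [List.map_cons]
        rw [ih ""]
        simp [pvK, hp]
    · simp only [List.zip_cons_cons, List.filter_cons]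
      rw [if_pos (by simp [hx])]
      simp only [List.map_cons]
      rw [ih x]
      simp [pvK, hx]

theorem pvStrip_newline (cs : List Char) :
    PySem.Chars.strip ('\n' :: cs) = PySem.Chars.strip cs := by
  simp [PySem.Chars.strip, PySem.Chars.lstrip,
    show PySem.Chars.isspace '\n' = true from rfl]

theorem pvStrip_join_blank (l : List String) :
    PySem.Str.strip (PySem.Str.join "\n" ("" :: l)) = PySem.Str.strip (PySem.Str.join "\n" l) := by
  cases l with
  | nil => rfl
  | cons y l' =>
    have h1 : (PySem.Str.join "\n" ("" :: y :: l')).toList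
        = '\n' :: (PySem.Str.join "\n" (y :: l')).toList := by
      simp [PySem.Str.join, PySem.Chars.join, List.intercalate]
    simp only [PySem.Str.strip]
    rw [h1, pvStrip_newline]

theorem pvNormDoc_eq (s : String) : pvNormDoc s = pvNormDocAlt s := by
  unfold pvNormDoc pvNormDocAlt
  by_cases h : s = ""
  · simp [h]
  · rw [if_neg h, if_neg h]
    rw [pvStepA_eq, ← List.foldl_map, pvFold_nil]
    generalize (PySem.Str.split? (PySem.Str.strip (PySem.Str.replace s "\r\n" "\n")) "\n").getD []
      = lines
    cases hrs : lines.map PySem.Str.rstrip with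
    | nil => rfl
    | cons hd t =>
      unfold pvKept
      have ht : (hd :: t).tail = t := rfl
      rw [ht, pvZip_filter t hd]
      by_cases hhd : hd = ""
      · subst hhd
        simp only [pvK, decide_true, List.take]
        exact (pvStrip_join_blank (pvK true t)).symm
      · simp [pvK, hhd]

theorem pvDict_fold (raw : List (String × String)) (d : PySem.Dict String String)
    (hnd : (raw.map Prod.fst).Nodup) (hdisj : ∀ p ∈ raw, d.contains p.1 = false) :
    (raw.foldl (fun (d : PySem.Dict String String) p =>
        if PySem.Str.isIn "." p.1 = false then d
        else if pvNormDoc p.2 ≠ "" then d.insert p.1 (pvNormDoc p.2) else d) d).items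
      = d.items ++ raw.filterMap (fun p =>
          if PySem.Str.isIn "." p.1 && pvNormDocAlt p.2 != "" then some (p.1, pvNormDocAlt p.2)
          else none) := by
  induction raw generalizing d with
  | nil => simp
  | cons p t ih =>
    simp only [List.map_cons, List.nodup_cons] at hnd
    have hdp : d.contains p.1 = false := hdisj p (by simp)
    rw [List.foldl_cons]
    cases hc : PySem.Str.isIn "." p.1 with
    | false =>
      have hc' : PySem.Chars.isIn ['.'] p.1.toList = false := by simpa using hc
      rw [if_pos rfl, List.filterMap_cons_none (by simp [hc'])]
      exact ih d hnd.2 (fun q hq => hdisj q (by simp [hq]))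
    | true =>
      have hc' : PySem.Chars.isIn ['.'] p.1.toList = true := by simpa using hc
      rw [if_neg (by simp)]
      by_cases hnd' : pvNormDoc p.2 = ""
      · have halt : pvNormDocAlt p.2 = "" := by rw [← pvNormDoc_eq]; exact hnd'
        rw [if_neg (by simp [hnd']), List.filterMap_cons_none (by simp [hc', halt])]
        exact ih d hnd.2 (fun q hq => hdisj q (by simp [hq]))
      · have halt : pvNormDocAlt p.2 ≠ "" := by rw [← pvNormDoc_eq]; exact hnd'
        have hsome : (if PySem.Str.isIn "." p.1 && pvNormDocAlt p.2 != "" then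
            some (p.1, pvNormDocAlt p.2) else none) = some (p.1, pvNormDocAlt p.2) := by
          simp [hc', halt]
        rw [if_pos hnd',
          @List.filterMap_cons_some (String × String) (String × String)
            (fun q => if PySem.Str.isIn "." q.1 && pvNormDocAlt q.2 != "" then
              some (q.1, pvNormDocAlt q.2) else none) p t (p.1, pvNormDocAlt p.2) hsome]
        rw [ih (d.insert p.1 (pvNormDoc p.2)) hnd.2 ?_]
        · rw [PySem.Dict.items_insert_of_not_contains _ _ hdp]
          simp [pvNormDoc_eq]
        · intro q hq
          rw [PySem.Dict.contains_insert]
          have hne : q.1 ≠ p.1 := by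
            intro hqp
            exact hnd.1 (hqp ▸ (List.mem_map_of_mem hq))
          simp [hne, hdisj q (by simp [hq])]

-- ===== VERDICT (by name: the statement is the Claim_ definition above) =====
theorem normalize_state_docs_py_spec : Claim_equal_normalize_state_docs_py := by
  intro raw _hdom hpre
  unfold Spec_normalize_state_docs_py normalize_state_docs_py normalize_state_docs_py_alt
  rw [pvDict_fold raw PySem.Dict.empty hpre (fun _ _ => rfl)]
  rfl
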